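-- pv_equiv track=rewrite | github.com/tanu-gv29/Prudent-AI-Intern-Tasks | Prudent tasks/Task 2/price_gap_pair.py | find_price_gap_pair
-- ===== SOURCE A (Python) =====
-- def find_price_gap_pair(nums, k):
--     seen = {}
--     best_pair = None
--     for j, num in enumerate(nums):
--         for target in (num - k, num + k):
--             if target in seen:
--                 i = seen[target]
--                 if i < j:
--                     pair = (i, j)
--                     if best_pair is None or pair < best_pair:
--                         best_pair = pair
--         if num not in seen:
--             seen[num] = j
--     return best_pair
-- ===== SOURCE B (Python) =====
-- def find_price_gap_pair(nums, k):
--     n = len(nums)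
--     for i in range(n):
--         for j in range(i + 1, n):
--             if nums[i] == nums[j] - k or nums[i] == nums[j] + k:
--                 return (i, j)
--     return None
-- ===== Notes on version B (the rewrite author's own statement) =====
-- stated objective: simpler
-- what changed: Replaced the hash-map pass that tracks first occurrences and a running lexicographic minimum with a direct double loop over index pairs in lexicographic order that returns the first matching pair immediately.
import Mathlib
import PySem

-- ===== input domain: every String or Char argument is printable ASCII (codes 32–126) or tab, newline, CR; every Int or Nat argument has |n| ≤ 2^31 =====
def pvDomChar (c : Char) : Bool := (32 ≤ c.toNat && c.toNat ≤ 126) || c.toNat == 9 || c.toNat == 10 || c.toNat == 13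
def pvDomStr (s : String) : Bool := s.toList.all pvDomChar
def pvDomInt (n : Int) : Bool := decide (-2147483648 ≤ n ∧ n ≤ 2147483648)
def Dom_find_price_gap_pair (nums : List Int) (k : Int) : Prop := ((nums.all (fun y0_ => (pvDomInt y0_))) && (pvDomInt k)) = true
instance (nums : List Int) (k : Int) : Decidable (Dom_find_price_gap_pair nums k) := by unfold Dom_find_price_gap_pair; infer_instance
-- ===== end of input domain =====

-- B replaces A's dict-of-first-occurrences + running lexicographic minimum with a plain
-- double loop over index pairs in lexicographic order returning the first match (simpler; not faster).

-- ===== PORT A =====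
-- Python tuple comparison (i, j) < (b1, b2) on the Nat index pairs A builds
def pvPairLt (p q : Nat × Nat) : Bool := p.1 < q.1 || (p.1 == q.1 && p.2 < q.2)

-- body of A's inner `for target in (num - k, num + k)` loop: one candidate lookup + best update
def pvUpd (seen : PySem.Dict Int Nat) (j : Nat) (best : Option (Nat × Nat)) (target : Int) :
    Option (Nat × Nat) :=
  match seen.get? target with
  | some i =>
    if i < j then
      match best with
      | none => some (i, j)
      | some b => if pvPairLt (i, j) b then some (i, j) else some b
    else best
  | none => best

-- body of A's outer `for j, num in enumerate(nums)` loop (state = (seen, best_pair); numj = (num, j))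
def pvStepA (k : Int) (st : PySem.Dict Int Nat × Option (Nat × Nat)) (numj : Int × Nat) :
    PySem.Dict Int Nat × Option (Nat × Nat) :=
  let best := ([numj.1 - k, numj.1 + k] : List Int).foldl (pvUpd st.1 numj.2) st.2
  let seen := if st.1.contains numj.1 then st.1 else st.1.insert numj.1 numj.2
  (seen, best)

def pvAcore (nums : List Int) (k : Int) : PySem.Dict Int Nat × Option (Nat × Nat) :=
  nums.zipIdx.foldl (pvStepA k) (PySem.Dict.empty, none)

def find_price_gap_pair (nums : List Int) (k : Int) : Option (Int × Int) :=
  (pvAcore nums k).2.map (fun p => ((p.1 : Int), (p.2 : Int)))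

-- ===== PORT B =====
-- Source B's nested index loops with early return = first hit of the nested scan
def pvBcore (nums : List Int) (k : Int) : Option (Nat × Nat) :=
  (List.range nums.length).findSome? (fun i =>
    (List.range' (i + 1) (nums.length - (i + 1))).findSome? (fun j =>
      if nums.getD i 0 == nums.getD j 0 - k || nums.getD i 0 == nums.getD j 0 + k
      then some (i, j) else none))

def find_price_gap_pair_alt (nums : List Int) (k : Int) : Option (Int × Int) :=
  (pvBcore nums k).map (fun p => ((p.1 : Int), (p.2 : Int)))

-- ===== PRECONDITION & SPEC =====
def Spec_find_price_gap_pair (nums : List Int) (k : Int) (out : Option (Int × Int)) : Prop := out = find_price_gap_pair_alt nums k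
instance (nums : List Int) (k : Int) (out : Option (Int × Int)) : Decidable (Spec_find_price_gap_pair nums k out) := by unfold Spec_find_price_gap_pair; infer_instance

-- ===== CLAIM (what is proved, stated in full; the proofs are below) =====
def Claim_equal_find_price_gap_pair : Prop := ∀ (nums : List Int) (k : Int), Dom_find_price_gap_pair nums k → Spec_find_price_gap_pair nums k (find_price_gap_pair nums k)

-- ===== LEMMAS AND PROOFS =====

-- (i, j) is a value-good pair: nums[i] == nums[j] - k or nums[i] == nums[j] + k
def pvGd (nums : List Int) (k : Int) (i j : Nat) : Prop :=
  nums.getD i 0 = nums.getD j 0 - k ∨ nums.getD i 0 = nums.getD j 0 + k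

def pvLexLe (p q : Nat × Nat) : Prop := p.1 < q.1 ∨ (p.1 = q.1 ∧ p.2 ≤ q.2)

-- what both programs compute after having examined all pairs with second index < m
def pvBestInv (nums : List Int) (k : Int) (m : Nat) (best : Option (Nat × Nat)) : Prop :=
  (best = none → ∀ i j, i < j → j < m → ¬ pvGd nums k i j) ∧
  (∀ p, best = some p → p.1 < p.2 ∧ p.2 < m ∧ pvGd nums k p.1 p.2 ∧
    ∀ i j, i < j → j < m → pvGd nums k i j → pvLexLe p (i, j))

-- A's dict maps each value seen so far to its first index of occurrence
def pvSeenInv (nums : List Int) (m : Nat) (seen : PySem.Dict Int Nat) : Prop :=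
  ∀ v i, seen.get? v = some i ↔
    (i < m ∧ nums.getD i 0 = v ∧ ∀ i', i' < i → nums.getD i' 0 ≠ v)

theorem pvPairLt_iff (p q : Nat × Nat) :
    pvPairLt p q = true ↔ (p.1 < q.1 ∨ (p.1 = q.1 ∧ p.2 < q.2)) := by
  simp [pvPairLt]

theorem pvLexLe_trans {p q r : Nat × Nat} (h1 : pvLexLe p q) (h2 : pvLexLe q r) : pvLexLe p r := by
  unfold pvLexLe at *; omega

theorem pvLexLe_of_le {p : Nat × Nat} {i0 i m : Nat} (h : i0 ≤ i) (hp : pvLexLe p (i0, m)) :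
    pvLexLe p (i, m) := by
  unfold pvLexLe at *; simp at *; omega

theorem pvBestInv_unique {nums : List Int} {k : Int} {m : Nat} {b1 b2 : Option (Nat × Nat)}
    (h1 : pvBestInv nums k m b1) (h2 : pvBestInv nums k m b2) : b1 = b2 := by
  cases b1 with
  | none =>
    cases b2 with
    | none => rfl
    | some p =>
      obtain ⟨hlt, hm, hgd, _⟩ := h2.2 p rfl
      exact absurd hgd (h1.1 rfl p.1 p.2 hlt hm)
  | some p =>
    cases b2 with
    | none =>
      obtain ⟨hlt, hm, hgd, _⟩ := h1.2 p rfl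
      exact absurd hgd (h2.1 rfl p.1 p.2 hlt hm)
    | some q =>
      obtain ⟨hlt1, hm1, hgd1, hmin1⟩ := h1.2 p rfl
      obtain ⟨hlt2, hm2, hgd2, hmin2⟩ := h2.2 q rfl
      have l1 := hmin1 q.1 q.2 hlt2 hm2 hgd2
      have l2 := hmin2 p.1 p.2 hlt1 hm1 hgd1
      have : p = q := by
        obtain ⟨p1, p2⟩ := p; obtain ⟨q1, q2⟩ := q
        unfold pvLexLe at l1 l2; simp at l1 l2 ⊢; omega
      rw [this]

-- first occurrence of a value that occurs
theorem pvFirstOcc {nums : List Int} {v : Int} {i : Nat} (hv : nums.getD i 0 = v) :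
    ∃ i0, i0 ≤ i ∧ nums.getD i0 0 = v ∧ ∀ i', i' < i0 → nums.getD i' 0 ≠ v := by
  have hex : ∃ t, nums.getD t 0 = v := ⟨i, hv⟩
  refine ⟨Nat.find hex, Nat.find_min' hex hv, Nat.find_spec hex, ?_⟩
  exact fun i' h => Nat.find_min hex h

-- candidate soundness: a stored index is a first occurrence below m
theorem pvF1 {nums : List Int} {m : Nat} {seen : PySem.Dict Int Nat}
    (hs : pvSeenInv nums m seen) {t : Int} {i : Nat} (h : seen.get? t = some i) :
    i < m ∧ nums.getD i 0 = t ∧ ∀ i', i' < i → nums.getD i' 0 ≠ t :=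
  (hs t i).1 h

-- candidate completeness: any occurrence below m has a stored (first) occurrence ≤ it
theorem pvF2 {nums : List Int} {m : Nat} {seen : PySem.Dict Int Nat}
    (hs : pvSeenInv nums m seen) {t : Int} {i : Nat} (hi : i < m) (hv : nums.getD i 0 = t) :
    ∃ i0, seen.get? t = some i0 ∧ i0 ≤ i := by
  obtain ⟨i0, hle, hv0, hfirst⟩ := pvFirstOcc hv
  exact ⟨i0, (hs t i0).2 ⟨lt_of_le_of_lt hle hi, hv0, hfirst⟩, hle⟩

-- pvUpd facts
theorem pvLexLe_refl (p : Nat × Nat) : pvLexLe p p := Or.inr ⟨rfl, le_refl _⟩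

theorem pvUpd_none {nums : List Int} {m : Nat} {seen : PySem.Dict Int Nat}
    (hs : pvSeenInv nums m seen) {b : Option (Nat × Nat)} {t : Int}
    (h : pvUpd seen m b t = none) : b = none ∧ seen.get? t = none := by
  cases hg : seen.get? t with
  | none => simp only [pvUpd, hg] at h; exact ⟨h, rfl⟩
  | some i =>
    have hi := (pvF1 hs hg).1
    cases b with
    | none => simp [pvUpd, hg, hi] at h
    | some q => by_cases hp : pvPairLt (i, m) q = true <;> simp [pvUpd, hg, hi, hp] at h

theorem pvUpd_some_cases {seen : PySem.Dict Int Nat} {m : Nat} {b : Option (Nat × Nat)} {t : Int}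
    {r : Nat × Nat} (h : pvUpd seen m b t = some r) :
    b = some r ∨ ∃ i, seen.get? t = some i ∧ r = (i, m) := by
  cases hg : seen.get? t with
  | none => simp only [pvUpd, hg] at h; exact Or.inl h
  | some i =>
    by_cases hi : i < m
    · cases b with
      | none =>
        simp [pvUpd, hg, hi] at h
        exact Or.inr ⟨i, rfl, h.symm⟩
      | some q =>
        by_cases hp : pvPairLt (i, m) q = true
        · simp [pvUpd, hg, hi, hp] at h
          exact Or.inr ⟨i, rfl, h.symm⟩
        · simp [pvUpd, hg, hi, hp] at h
          exact Or.inl (by rw [h])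
    · simp [pvUpd, hg, hi] at h; exact Or.inl h

theorem pvUpd_le_old {seen : PySem.Dict Int Nat} {m : Nat} {b : Option (Nat × Nat)} {t : Int}
    {r q : Nat × Nat} (h : pvUpd seen m b t = some r) (hb : b = some q) : pvLexLe r q := by
  subst hb
  cases hg : seen.get? t with
  | none =>
    simp only [pvUpd, hg] at h
    simp at h
    subst h; exact pvLexLe_refl _
  | some i =>
    by_cases hi : i < m
    · by_cases hp : pvPairLt (i, m) q = true
      · simp [pvUpd, hg, hi, hp] at h
        subst h
        rw [pvPairLt_iff] at hp
        unfold pvLexLe; simp at hp ⊢; omega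
      · simp [pvUpd, hg, hi, hp] at h
        subst h; exact pvLexLe_refl _
    · simp [pvUpd, hg, hi] at h
      subst h; exact pvLexLe_refl _

theorem pvUpd_le_cand {seen : PySem.Dict Int Nat} {m : Nat} {b : Option (Nat × Nat)} {t : Int}
    {r : Nat × Nat} {i : Nat} (h : pvUpd seen m b t = some r)
    (hg : seen.get? t = some i) (hi : i < m) : pvLexLe r (i, m) := by
  cases b with
  | none =>
    simp [pvUpd, hg, hi] at h
    subst h; exact pvLexLe_refl _
  | some q =>
    by_cases hp : pvPairLt (i, m) q = true
    · simp [pvUpd, hg, hi, hp] at h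
      subst h; exact pvLexLe_refl _
    · simp [pvUpd, hg, hi, hp] at h
      subst h
      unfold pvPairLt at hp
      unfold pvLexLe
      simp at hp ⊢; omega

theorem pvUpd_isSome {seen : PySem.Dict Int Nat} {m : Nat} {b : Option (Nat × Nat)} {t : Int}
    {i : Nat} (hg : seen.get? t = some i) (hi : i < m) : (pvUpd seen m b t).isSome := by
  cases b with
  | none => simp [pvUpd, hg, hi]
  | some q => by_cases hp : pvPairLt (i, m) q = true <;> simp [pvUpd, hg, hi, hp]

-- the seen-update of one step of A's outer loop preserves pvSeenInv
theorem pvStep_seen {nums : List Int} {m : Nat} {seen : PySem.Dict Int Nat}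
    (hs : pvSeenInv nums m seen) (hm : m < nums.length) :
    pvSeenInv nums (m + 1)
      (if seen.contains (nums.getD m 0) then seen else seen.insert (nums.getD m 0) m) := by
  by_cases hc : seen.contains (nums.getD m 0)
  · rw [if_pos hc]
    have hsome : (seen.get? (nums.getD m 0)).isSome := by
      rw [← PySem.Dict.contains_eq_isSome_get?]; exact hc
    obtain ⟨i0, hg0⟩ := Option.isSome_iff_exists.mp hsome
    have hf := pvF1 hs hg0
    intro v i
    constructor
    · intro h
      obtain ⟨h1, h2, h3⟩ := (hs v i).1 h
      exact ⟨Nat.lt_succ_of_lt h1, h2, h3⟩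
    · rintro ⟨h1, h2, h3⟩
      rcases Nat.lt_succ_iff_lt_or_eq.mp h1 with h1' | heq
      · exact (hs v i).2 ⟨h1', h2, h3⟩
      · exfalso
        apply h3 i0 (by omega)
        rw [hf.2.1, ← heq]
        exact h2
  · rw [if_neg hc]
    have hnone : seen.get? (nums.getD m 0) = none := by
      cases hgn : seen.get? (nums.getD m 0) with
      | none => rfl
      | some i =>
        exact absurd (by rw [PySem.Dict.contains_eq_isSome_get?, hgn]; rfl) hc
    intro v i
    rw [PySem.Dict.get?_insert]
    by_cases hv : v = nums.getD m 0
    · rw [if_pos hv]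
      constructor
      · intro h
        have heq : i = m := by injection h with h; omega
        subst heq
        refine ⟨Nat.lt_succ_self _, hv.symm, ?_⟩
        intro i' hi' hveq
        obtain ⟨j0, hj0, _⟩ := pvF2 hs hi' (by rw [hveq, hv])
        rw [hj0] at hnone
        simp at hnone
      · rintro ⟨h1, h2, h3⟩
        rcases Nat.lt_succ_iff_lt_or_eq.mp h1 with h1' | heq
        · exfalso
          obtain ⟨j0, hj0, _⟩ := pvF2 hs h1' (by rw [h2, hv])
          rw [hj0] at hnone
          simp at hnone
        · rw [heq]
    · rw [if_neg hv]
      constructor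
      · intro h
        obtain ⟨h1, h2, h3⟩ := (hs v i).1 h
        exact ⟨Nat.lt_succ_of_lt h1, h2, h3⟩
      · rintro ⟨h1, h2, h3⟩
        rcases Nat.lt_succ_iff_lt_or_eq.mp h1 with h1' | heq
        · exact (hs v i).2 ⟨h1', h2, h3⟩
        · exact absurd (heq ▸ h2).symm hv

-- the best-update of one step of A's outer loop advances pvBestInv from m to m+1
theorem pvStep_best {nums : List Int} {k : Int} {m : Nat} {seen : PySem.Dict Int Nat}
    {best : Option (Nat × Nat)}
    (hs : pvSeenInv nums m seen) (hb : pvBestInv nums k m best) :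
    pvBestInv nums k (m + 1)
      (([nums.getD m 0 - k, nums.getD m 0 + k] : List Int).foldl (pvUpd seen m) best) := by
  set num := nums.getD m 0 with hnum
  set t1 := num - k with ht1
  set t2 := num + k with ht2
  have hfold : ([t1, t2] : List Int).foldl (pvUpd seen m) best
      = pvUpd seen m (pvUpd seen m best t1) t2 := by simp [List.foldl]
  rw [hfold]
  set b1 := pvUpd seen m best t1 with hb1
  constructor
  · -- result none → no good pair with j < m+1
    intro h0 i j hij hj hgd
    obtain ⟨hb1n, hg2⟩ := pvUpd_none hs h0
    obtain ⟨hbn, hg1⟩ := pvUpd_none hs hb1n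
    rcases Nat.lt_succ_iff_lt_or_eq.mp hj with hj | heq
    · exact hb.1 hbn i j hij hj hgd
    · -- j = m: nums[i] is t1 or t2, so seen would have a candidate
      rw [heq] at hij hgd
      rcases hgd with hv | hv
      · obtain ⟨i0, hg, _⟩ := pvF2 hs hij hv
        rw [hg] at hg1; simp at hg1
      · obtain ⟨i0, hg, _⟩ := pvF2 hs hij hv
        rw [hg] at hg2; simp at hg2
  · intro p hp
    -- validity of p
    have hvalid : p.1 < p.2 ∧ p.2 < m + 1 ∧ pvGd nums k p.1 p.2 := by
      rcases pvUpd_some_cases hp with h1 | ⟨i, hg, rfl⟩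
      · rcases pvUpd_some_cases h1 with h2 | ⟨i, hg, rfl⟩
        · obtain ⟨a, b, c, _⟩ := hb.2 p h2
          exact ⟨a, Nat.lt_succ_of_lt b, c⟩
        · obtain ⟨hi, hv, _⟩ := pvF1 hs hg
          exact ⟨hi, Nat.lt_succ_self _, Or.inl hv⟩
      · obtain ⟨hi, hv, _⟩ := pvF1 hs hg
        exact ⟨hi, Nat.lt_succ_self _, Or.inr hv⟩
    refine ⟨hvalid.1, hvalid.2.1, hvalid.2.2, ?_⟩
    -- minimality of p
    intro i j hij hj hgd
    rcases Nat.lt_succ_iff_lt_or_eq.mp hj with hj | heq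
    · -- old pair: old best dominates it, and p dominates old best
      cases hbo : best with
      | none => exact absurd hgd (hb.1 hbo i j hij hj)
      | some q =>
        have hq := (hb.2 q hbo).2.2.2 i j hij hj hgd
        cases hb1o : b1 with
        | none => exact absurd ((pvUpd_none hs hb1o).1) (by rw [hbo]; simp)
        | some q1 =>
          have h1 : pvLexLe q1 q := pvUpd_le_old (hb1 ▸ hb1o) hbo
          have h2 : pvLexLe p q1 := pvUpd_le_old hp hb1o
          exact pvLexLe_trans h2 (pvLexLe_trans h1 hq)
    · -- new pair (i, m): its value's first occurrence is a candidate A compared against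
      rw [heq] at hij hgd ⊢
      rcases hgd with hv | hv
      · -- nums[i] = t1
        obtain ⟨i0, hg, hle⟩ := pvF2 hs hij hv
        have hi0 : i0 < m := (pvF1 hs hg).1
        cases hb1o : b1 with
        | none =>
          exfalso
          have := pvUpd_isSome (b := best) hg hi0
          rw [← hb1, hb1o] at this; simp at this
        | some q1 =>
          have h1 : pvLexLe q1 (i0, m) := pvUpd_le_cand (hb1 ▸ hb1o) hg hi0
          have h2 : pvLexLe p q1 := pvUpd_le_old hp hb1o
          exact pvLexLe_of_le hle (pvLexLe_trans h2 h1)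
      · -- nums[i] = t2
        obtain ⟨i0, hg, hle⟩ := pvF2 hs hij hv
        have hi0 : i0 < m := (pvF1 hs hg).1
        exact pvLexLe_of_le hle (pvUpd_le_cand hp hg hi0)

-- A's whole loop, by induction on the unprocessed suffix
theorem pvA_loop (nums : List Int) (k : Int) :
    ∀ (rest : List Int) (m : Nat) (seen : PySem.Dict Int Nat) (best : Option (Nat × Nat)),
      nums.drop m = rest → m + rest.length = nums.length →
      pvSeenInv nums m seen → pvBestInv nums k m best →
      pvBestInv nums k nums.length ((rest.zipIdx m).foldl (pvStepA k) (seen, best)).2 := by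
  intro rest
  induction rest with
  | nil =>
    intro m seen best _ hlen _ hbest
    simp at hlen ⊢
    rwa [← hlen]
  | cons num rest' ih =>
    intro m seen best hdrop hlen hseen hbest
    have hm : m < nums.length := by simp at hlen; omega
    have hnum : nums.getD m 0 = num := by
      have : nums[m]? = some num := by
        rw [← List.head?_drop, hdrop]; rfl
      rw [List.getD_eq_getElem?_getD, this]; rfl
    have hdrop' : nums.drop (m + 1) = rest' := by
      rw [← List.tail_drop, hdrop]; rfl
    rw [List.zipIdx_cons, List.foldl_cons]
    have hstep : pvStepA k (seen, best) (num, m)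
        = (if seen.contains num then seen else seen.insert num m,
           ([num - k, num + k] : List Int).foldl (pvUpd seen m) best) := rfl
    rw [hstep]
    apply ih (m + 1)
    · exact hdrop'
    · simp at hlen ⊢; omega
    · rw [← hnum]; exact pvStep_seen hseen hm
    · rw [← hnum]; exact pvStep_best hseen hbest

-- generic first-hit characterizations of findSome? over an index range
theorem pvFindSome?_range'_none {β : Type} (g : Nat → Option β) :
    ∀ (len s : Nat), (List.range' s len).findSome? g = none ↔
      ∀ j, s ≤ j → j < s + len → g j = none := by
  intro len
  induction len with
  | zero =>
    intro s
    refine ⟨fun _ j h1 h2 => absurd h2 (by omega), fun _ => by simp⟩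
  | succ len ih =>
    intro s
    rw [List.range'_succ, List.findSome?_cons]
    cases hg : g s with
    | some b =>
      show some b = none ↔ _
      constructor
      · intro h; simp at h
      · intro h; rw [h s (le_refl _) (by omega)] at hg; simp at hg
    | none =>
      show List.findSome? g (List.range' (s + 1) len) = none ↔ _
      rw [ih (s + 1)]
      constructor
      · intro h j h1 h2
        rcases Nat.eq_or_lt_of_le h1 with rfl | h1
        · exact hg
        · exact h j h1 (by omega)
      · intro h j h1 h2
        exact h j (by omega) (by omega)

theorem pvFindSome?_range'_some {β : Type} (g : Nat → Option β) :
    ∀ (len s : Nat) (p : β), (List.range' s len).findSome? g = some p →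
      ∃ j, s ≤ j ∧ j < s + len ∧ g j = some p ∧ ∀ j', s ≤ j' → j' < j → g j' = none := by
  intro len
  induction len with
  | zero => intro s p h; simp at h
  | succ len ih =>
    intro s p h
    rw [List.range'_succ, List.findSome?_cons] at h
    cases hg : g s with
    | some b =>
      rw [hg] at h
      have hb : some b = some p := h
      have hbp : b = p := by injection hb
      subst hbp
      exact ⟨s, le_refl _, by omega, hg, fun j' h1 h2 => by omega⟩
    | none =>
      rw [hg] at h
      have h' : List.findSome? g (List.range' (s + 1) len) = some p := h
      obtain ⟨j, h1, h2, h3, h4⟩ := ih (s + 1) p h'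
      refine ⟨j, by omega, by omega, h3, ?_⟩
      intro j' hj1 hj2
      rcases Nat.eq_or_lt_of_le hj1 with rfl | hj1
      · exact hg
      · exact h4 j' hj1 hj2

-- B's inner if-expression versus pvGd
theorem pvBif_some {nums : List Int} {k : Int} {i j : Nat} {p : Nat × Nat}
    (h : (if nums.getD i 0 == nums.getD j 0 - k || nums.getD i 0 == nums.getD j 0 + k
          then some (i, j) else none) = some p) : pvGd nums k i j ∧ p = (i, j) := by
  split at h
  · rename_i hc; simp at hc h
    exact ⟨by unfold pvGd; tauto, h.symm⟩
  · simp at h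

theorem pvBif_none {nums : List Int} {k : Int} {i j : Nat}
    (h : (if nums.getD i 0 == nums.getD j 0 - k || nums.getD i 0 == nums.getD j 0 + k
          then some (i, j) else none) = none) : ¬ pvGd nums k i j := by
  split at h
  · simp at h
  · rename_i hc; simp at hc; unfold pvGd; tauto

-- B computes a pvBestInv-satisfying value at n = nums.length
theorem pvB_char (nums : List Int) (k : Int) :
    pvBestInv nums k nums.length (pvBcore nums k) := by
  set n := nums.length with hn
  set g : Nat → Option (Nat × Nat) := fun i =>
    (List.range' (i + 1) (n - (i + 1))).findSome? (fun j =>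
      if nums.getD i 0 == nums.getD j 0 - k || nums.getD i 0 == nums.getD j 0 + k
      then some (i, j) else none) with hg
  have hcore : pvBcore nums k = (List.range' 0 n).findSome? g := by
    rw [pvBcore, ← List.range_eq_range']
  have hinner_none : ∀ i, g i = none → ∀ j, i < j → j < n → ¬ pvGd nums k i j := by
    intro i h j h1 h2
    have := (pvFindSome?_range'_none _ _ _).mp h j h1 (by omega)
    exact pvBif_none this
  constructor
  · intro h0 i j hij hj hgd
    rw [hcore] at h0
    have houter := (pvFindSome?_range'_none g n 0).mp h0
    have hgi : g i = none := houter i (by omega) (by omega)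
    exact hinner_none i hgi j hij hj hgd
  · intro p hp
    rw [hcore] at hp
    obtain ⟨i, _, hi2, hgi, houter⟩ := pvFindSome?_range'_some g n 0 p hp
    simp only [Nat.zero_add] at hi2
    obtain ⟨j, hj1, hj2, hj3, hinner⟩ := pvFindSome?_range'_some _ _ _ p hgi
    obtain ⟨hgd, rfl⟩ := pvBif_some hj3
    have hjn : j < n := by omega
    refine ⟨by omega, hjn, hgd, ?_⟩
    intro i' j' hij' hj' hgd'
    rcases Nat.lt_trichotomy i' i with hlt | rfl | hgt
    · exfalso
      exact hinner_none i' (houter i' (by omega) hlt) j' hij' hj' hgd'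
    · -- same first index: j ≤ j' by inner minimality
      by_cases hjj : j' < j
      · exact absurd hgd' (pvBif_none (hinner j' (by omega) hjj))
      · exact Or.inr ⟨rfl, by omega⟩
    · exact Or.inl hgt

theorem pvSeenInv_empty (nums : List Int) : pvSeenInv nums 0 PySem.Dict.empty := by
  intro v i
  simp [PySem.Dict.get?_empty]

theorem pvBestInv_zero (nums : List Int) (k : Int) : pvBestInv nums k 0 none := by
  constructor
  · intro _ i j _ hj; omega
  · intro p hp; simp at hp

-- ===== VERDICT (by name: the statement is the Claim_ definition above) =====
theorem find_price_gap_pair_spec : Claim_equal_find_price_gap_pair := by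
  intro nums k _
  unfold Spec_find_price_gap_pair find_price_gap_pair find_price_gap_pair_alt
  have hA : pvBestInv nums k nums.length (pvAcore nums k).2 := by
    have := pvA_loop nums k nums 0 PySem.Dict.empty none (by simp) (by simp)
      (pvSeenInv_empty nums) (pvBestInv_zero nums k)
    simpa [pvAcore] using this
  have hB : pvBestInv nums k nums.length (pvBcore nums k) := pvB_char nums k
  rw [pvBestInv_unique hA hB]
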